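-- pv_equiv track=rewrite | github.com/Kaiserreich/HOI4-Validator | Scripts/scopeGen.py | find_next_occurance_of_terms
-- ===== SOURCE A (Python) =====
-- def find_next_occurance_of_terms(index, search_terms, string):
--     non_zero_search_terms = []
--     for search_term in search_terms:
--         next_index = string.find(search_term, index + 1)
--         if next_index >= 0:
--             non_zero_search_terms += [search_term]
--     if len(non_zero_search_terms) == 0:
--         return -1
--     else:
--         minimun = min([string.find(search_term, index + 1) for search_term in non_zero_search_terms])
--         return minimun
-- ===== SOURCE B (Python) =====
-- def find_next_occurance_of_terms(index, search_terms, string):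
--     best = -1
--     for term in search_terms:
--         pos = string.find(term, index + 1)
--         if pos >= 0 and (best == -1 or pos < best):
--             best = pos
--     return best
-- ===== Notes on version B (the rewrite author's own statement) =====
-- stated objective: simpler
-- what changed: Replaces A's two-phase scheme (build a filtered list of matching terms, then recompute every find inside min(...)) with a single accumulator-carrying pass that calls string.find exactly once per term and keeps a running minimum with -1 as sentinel.
import Mathlib
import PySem

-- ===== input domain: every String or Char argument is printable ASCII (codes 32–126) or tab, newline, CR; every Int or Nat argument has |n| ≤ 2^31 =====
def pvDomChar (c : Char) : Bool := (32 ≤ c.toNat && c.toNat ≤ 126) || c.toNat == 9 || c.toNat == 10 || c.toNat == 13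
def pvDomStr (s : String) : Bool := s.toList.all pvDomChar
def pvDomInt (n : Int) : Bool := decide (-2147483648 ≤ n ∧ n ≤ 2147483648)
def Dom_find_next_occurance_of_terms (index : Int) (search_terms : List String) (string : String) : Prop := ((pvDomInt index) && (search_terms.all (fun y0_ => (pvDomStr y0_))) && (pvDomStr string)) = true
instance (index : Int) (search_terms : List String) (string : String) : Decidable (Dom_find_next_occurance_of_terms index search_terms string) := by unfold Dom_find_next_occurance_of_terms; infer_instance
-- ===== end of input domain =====

-- B replaces A's two-phase scheme (filtered list, then min over recomputed finds) with a
-- single pass keeping a running minimum (one find per term); same results, simpler.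

-- ===== PORT A =====
def find_next_occurance_of_terms (index : Int) (search_terms : List String) (string : String) : Int :=
  let non_zero_search_terms :=
    search_terms.foldl (fun acc search_term =>
      let next_index := PySem.Str.findFrom string search_term (index + 1)
      if 0 ≤ next_index then acc ++ [search_term] else acc) []
  if non_zero_search_terms.length = 0 then -1
  else
    match PySem.List.min? (non_zero_search_terms.map
        (fun search_term => PySem.Str.findFrom string search_term (index + 1))) (fun x => x) with
    | some minimun => minimun
    | none => -1  -- unreachable: Python's min is applied to a nonempty list here

-- ===== PORT B =====
def find_next_occurance_of_terms_alt (index : Int) (search_terms : List String) (string : String) : Int :=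
  search_terms.foldl (fun best term =>
    let pos := PySem.Str.findFrom string term (index + 1)
    if 0 ≤ pos ∧ (best = -1 ∨ pos < best) then pos else best) (-1)

-- ===== PRECONDITION & SPEC =====
def Spec_find_next_occurance_of_terms (index : Int) (search_terms : List String) (string : String) (out : Int) : Prop := out = find_next_occurance_of_terms_alt index search_terms string
instance (index : Int) (search_terms : List String) (string : String) (out : Int) : Decidable (Spec_find_next_occurance_of_terms index search_terms string out) := by unfold Spec_find_next_occurance_of_terms; infer_instance

-- ===== CLAIM (what is proved, stated in full; the proofs are below) =====
def Claim_equal_find_next_occurance_of_terms : Prop := ∀ (index : Int) (search_terms : List String) (string : String), Dom_find_next_occurance_of_terms index search_terms string → Spec_find_next_occurance_of_terms index search_terms string (find_next_occurance_of_terms index search_terms string)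

-- ===== LEMMAS AND PROOFS =====

-- A's filtering loop builds acc ++ filter
theorem pvA_filter_loop (f : String → Int) (ts : List String) (acc : List String) :
    ts.foldl (fun a t => if 0 ≤ f t then a ++ [t] else a) acc
      = acc ++ ts.filter (fun t => decide (0 ≤ f t)) := by
  induction ts generalizing acc with
  | nil => simp
  | cons t ts ih =>
      by_cases h : 0 ≤ f t <;> simp [h, ih]

-- B's loop equals a fold of the sentinel-min step over the found positions of the matching terms
theorem pvB_loop_vals (f : String → Int) (ts : List String) (b : Int) :
    ts.foldl (fun best t => if 0 ≤ f t ∧ (best = -1 ∨ f t < best) then f t else best) b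
      = ((ts.filter (fun t => decide (0 ≤ f t))).map f).foldl
          (fun best v => if best = -1 then v else min best v) b := by
  induction ts generalizing b with
  | nil => rfl
  | cons t ts ih =>
      by_cases h : 0 ≤ f t
      · simp only [List.filter_cons, h, decide_true, if_true, List.map_cons, List.foldl_cons]
        rw [ih]
        congr 1
        by_cases hb : b = -1
        · simp [hb]
        · by_cases hlt : f t < b <;> simp [hb, hlt, min_def]
      · simp [h, ih]

-- on nonnegative values the sentinel-min fold starting at a nonnegative seed is a plain running min
theorem pvMin_fold (vs : List Int) (v : Int) (hv : 0 ≤ v) (hall : ∀ x ∈ vs, 0 ≤ x) :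
    vs.foldl (fun best w => if best = -1 then w else min best w) v = vs.foldl min v := by
  induction vs generalizing v with
  | nil => rfl
  | cons w vs ih =>
      have hw : 0 ≤ w := hall w (by simp)
      have hv' : v ≠ -1 := by omega
      simp only [List.foldl_cons, hv', if_false]
      exact ih (min v w) (le_min hv hw) (fun x hx => hall x (by simp [hx]))

theorem find_next_spec_aux (index : Int) (search_terms : List String) (string : String) :
    find_next_occurance_of_terms index search_terms string
      = find_next_occurance_of_terms_alt index search_terms string := by
  unfold find_next_occurance_of_terms find_next_occurance_of_terms_alt
  set f : String → Int := fun t => PySem.Str.findFrom string t (index + 1) with hf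
  simp only
  rw [pvA_filter_loop f, pvB_loop_vals f]
  cases hFlt : search_terms.filter (fun t => decide (0 ≤ f t)) with
  | nil => simp
  | cons t ts =>
      have hall : ∀ x ∈ ts.map f, (0 : Int) ≤ x := by
        intro x hx
        obtain ⟨u, hu, rfl⟩ := List.mem_map.1 hx
        have hu' : u ∈ search_terms.filter (fun t => decide (0 ≤ f t)) := by
          rw [hFlt]; exact List.mem_cons_of_mem _ hu
        exact of_decide_eq_true (List.mem_filter.1 hu').2
      have ht : 0 ≤ f t := by
        have : t ∈ search_terms.filter (fun t => decide (0 ≤ f t)) := by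
          rw [hFlt]; exact List.mem_cons_self
        exact of_decide_eq_true (List.mem_filter.1 this).2
      simp only [List.nil_append, List.map_cons, List.foldl_cons, List.length_cons,
        PySem.List.min?_id_cons, Nat.succ_ne_zero, if_false, if_true]
      exact (pvMin_fold (ts.map f) (f t) ht hall).symm

-- ===== VERDICT (by name: the statement is the Claim_ definition above) =====
theorem find_next_occurance_of_terms_spec : Claim_equal_find_next_occurance_of_terms := by
  intro index search_terms string _
  exact find_next_spec_aux index search_terms string
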